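-- pv_equiv track=rewrite | github.com/vmaza-dev/Progra_1-Reserva_de_turnos_medicos | turnos/cre_leer.py | contar_ocurr_elementos_turnos
-- ===== SOURCE A (Python) =====
-- def contar_ocurr_elementos_turnos(mat_turnos, lista_elementos):
--     """
--     Devuelve una lista con el conteo de cada elemento en matriz de turnos.
--
--     Parámetros:
--         mat_turnos(list[list])
--         lista_elementos(list)
--
--     Returns:
--         list[list[]]
--     """
--     lista_conteos = []
--     for elemento in lista_elementos:
--         contador = 0
--         for turno in mat_turnos:
--             if elemento in turno:
--                 contador += 1
--         lista_conteos.append([elemento, contador])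
--     return lista_conteos
-- ===== SOURCE B (Python) =====
-- def contar_ocurr_elementos_turnos(mat_turnos, lista_elementos):
--     conteos = {}
--     for turno in mat_turnos:
--         for e in set(turno):
--             conteos[e] = conteos.get(e, 0) + 1
--     return [[e, conteos.get(e, 0)] for e in lista_elementos]
-- ===== Notes on version B (the rewrite author's own statement) =====
-- stated objective: faster
-- what changed: Instead of scanning every row for every element (nested loops), B makes one pass over the matrix building a dict of per-row-distinct counts, then emits [e, count] by dictionary lookup in element order.
import Mathlib
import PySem

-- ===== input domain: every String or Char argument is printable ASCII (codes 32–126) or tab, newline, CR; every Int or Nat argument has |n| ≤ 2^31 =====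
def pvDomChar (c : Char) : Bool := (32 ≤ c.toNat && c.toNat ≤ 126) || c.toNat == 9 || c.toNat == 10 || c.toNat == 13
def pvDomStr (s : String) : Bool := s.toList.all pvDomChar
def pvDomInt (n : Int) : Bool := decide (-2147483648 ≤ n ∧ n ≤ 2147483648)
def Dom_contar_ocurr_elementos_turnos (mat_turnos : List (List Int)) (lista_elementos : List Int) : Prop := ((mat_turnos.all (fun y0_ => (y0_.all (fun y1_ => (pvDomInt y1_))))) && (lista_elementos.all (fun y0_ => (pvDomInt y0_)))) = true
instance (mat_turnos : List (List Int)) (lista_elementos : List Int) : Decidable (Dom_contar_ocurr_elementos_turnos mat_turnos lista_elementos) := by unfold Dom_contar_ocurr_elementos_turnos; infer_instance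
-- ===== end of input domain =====

-- B replaces A's per-element scan of the whole matrix by one pass that counts each
-- row's distinct elements into a dict, then looks counts up in element order (faster).

-- ===== PORT A =====
def contar_ocurr_elementos_turnos (mat_turnos : List (List Int)) (lista_elementos : List Int) : List (List Int) :=
  lista_elementos.foldl
    (fun lista_conteos elemento =>
      let contador : Int :=
        mat_turnos.foldl (fun contador turno => if turno.contains elemento then contador + 1 else contador) 0
      lista_conteos ++ [[elemento, contador]])
    []

-- ===== PORT B =====
def contar_ocurr_elementos_turnos_alt (mat_turnos : List (List Int)) (lista_elementos : List Int) : List (List Int) :=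
  let conteos : PySem.Dict Int Int :=
    mat_turnos.foldl
      (fun conteos turno =>
        (PySem.Set.ofList turno).foldl (fun d e => d.insert e (d.getD e 0 + 1)) conteos)
      PySem.Dict.empty
  lista_elementos.map (fun e => [e, conteos.getD e 0])

-- ===== PRECONDITION & SPEC =====
def Spec_contar_ocurr_elementos_turnos (mat_turnos : List (List Int)) (lista_elementos : List Int) (out : List (List Int)) : Prop := out = contar_ocurr_elementos_turnos_alt mat_turnos lista_elementos
instance (mat_turnos : List (List Int)) (lista_elementos : List Int) (out : List (List Int)) : Decidable (Spec_contar_ocurr_elementos_turnos mat_turnos lista_elementos out) := by unfold Spec_contar_ocurr_elementos_turnos; infer_instance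

-- ===== CLAIM (what is proved, stated in full; the proofs are below) =====
def Claim_equal_contar_ocurr_elementos_turnos : Prop := ∀ (mat_turnos : List (List Int)) (lista_elementos : List Int), Dom_contar_ocurr_elementos_turnos mat_turnos lista_elementos → Spec_contar_ocurr_elementos_turnos mat_turnos lista_elementos (contar_ocurr_elementos_turnos mat_turnos lista_elementos)

-- ===== LEMMAS AND PROOFS =====

-- in a duplicate-free list (a set), count is 1 or 0 by membership
lemma count_ofList_eq (t : List Int) (e : Int) :
    ((PySem.Set.ofList t).count e : Int) = (if t.contains e then 1 else 0) := by
  by_cases h : e ∈ t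
  · rw [List.count_eq_one_of_mem (PySem.Set.nodup_ofList t) ((PySem.Set.mem_ofList t e).2 h)]
    simp [h]
  · rw [List.count_eq_zero_of_not_mem (by simpa [PySem.Set.mem_ofList t e] using h)]
    simp [h]

-- the dict built by B's matrix pass holds, at key e, the number of rows containing e
lemma getD_rows (mat : List (List Int)) (d : PySem.Dict Int Int) (e : Int) :
    (mat.foldl
        (fun conteos turno =>
          (PySem.Set.ofList turno).foldl (fun d x => d.insert x (d.getD x 0 + 1)) conteos)
        d).getD e 0
      = d.getD e 0 + (mat.countP (fun t => t.contains e) : Int) := by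
  induction mat generalizing d with
  | nil => simp
  | cons t rest ih =>
    rw [List.foldl_cons, ih, PySem.Dict.getD_foldl_insert_add_one, count_ofList_eq,
      List.countP_cons]
    split_ifs with h <;> push_cast <;> ring

theorem contar_ocurr_pointwise (m : List (List Int)) (l : List Int) :
    contar_ocurr_elementos_turnos m l = contar_ocurr_elementos_turnos_alt m l := by
  unfold contar_ocurr_elementos_turnos contar_ocurr_elementos_turnos_alt
  rw [PySem.List.foldl_append_singleton_eq_map]
  simp only [List.nil_append]
  apply List.map_congr_left
  intro e _
  rw [PySem.List.foldl_if_add_one, getD_rows]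
  simp

-- ===== VERDICT (by name: the statement is the Claim_ definition above) =====
theorem contar_ocurr_elementos_turnos_spec : Claim_equal_contar_ocurr_elementos_turnos := by
  intro m l _
  unfold Spec_contar_ocurr_elementos_turnos
  exact contar_ocurr_pointwise m l
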